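-- pv_equiv track=rewrite | github.com/LZWcc/CS61A | lab/lab08/lab08.py | merge_numbers
-- ===== SOURCE A (Python) =====
-- def merge_numbers(n1, n2):
--     """Merges two numbers that have decreasing digits.
--
--     >>> merge_numbers(31, 42)
--     4321
--     >>> merge_numbers(21, 0)
--     21
--     >>> merge_numbers(21, 31)
--     3211
--     """
--     if n1 == 0:
--         return n2
--     if n2 == 0:
--         return n1
--
--     if n1 % 10 < n2 % 10:
--         return n1 % 10 + merge_numbers(n1 // 10, n2) * 10
--     else:
--         return n2 % 10 + merge_numbers(n1, n2 // 10) * 10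
--     "*** YOUR CODE HERE ***"
-- ===== SOURCE B (Python) =====
-- def merge_numbers(n1, n2):
--     """Iterative merge: accumulate chosen trailing digits with a place multiplier."""
--     result = 0
--     place = 1
--     while n1 != 0 and n2 != 0:
--         if n1 % 10 < n2 % 10:
--             result += (n1 % 10) * place
--             n1 //= 10
--         else:
--             result += (n2 % 10) * place
--             n2 //= 10
--         place *= 10
--     result += (n1 if n1 != 0 else n2) * place
--     return result
-- ===== Notes on version B (the rewrite author's own statement) =====
-- stated objective: alternative
-- what changed: Replaced the recursive merge (digit + recursive call * 10) by an iterative single loop that accumulates chosen trailing digits into an accumulator with a running place multiplier and appends the leftover number once at the end.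
-- outside the precondition, e.g. on merge_numbers(5, -17): A returns -147, B returns -147; on merge_numbers(9, -1): A raises RecursionError, B does not finish within the time limit
import Mathlib
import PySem

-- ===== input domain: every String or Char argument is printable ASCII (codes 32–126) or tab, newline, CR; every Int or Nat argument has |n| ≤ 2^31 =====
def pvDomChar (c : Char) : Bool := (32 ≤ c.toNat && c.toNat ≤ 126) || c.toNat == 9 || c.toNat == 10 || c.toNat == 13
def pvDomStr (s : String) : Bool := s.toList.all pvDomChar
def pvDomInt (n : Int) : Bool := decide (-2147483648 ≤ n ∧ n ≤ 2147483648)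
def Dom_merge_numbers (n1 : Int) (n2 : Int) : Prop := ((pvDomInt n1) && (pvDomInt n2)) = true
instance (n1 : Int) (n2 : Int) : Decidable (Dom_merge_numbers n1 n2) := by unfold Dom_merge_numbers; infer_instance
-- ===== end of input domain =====

-- B replaces A's recursion by one iterative loop with an accumulator and place multiplier (objective: alternative decomposition; return value only).

-- ===== PORT A =====
-- Fuel makes A's recursion total in Lean; inside Pre_ the fuel (natAbs n1 + natAbs n2 + 1) is never exhausted.
def mergeFuelA : Nat → Int → Int → Int
  | 0, _, _ => 0
  | f + 1, n1, n2 =>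
    if n1 = 0 then n2
    else if n2 = 0 then n1
    else if PySem.Int.mod n1 10 < PySem.Int.mod n2 10 then
      PySem.Int.mod n1 10 + mergeFuelA f (PySem.Int.floordiv n1 10) n2 * 10
    else
      PySem.Int.mod n2 10 + mergeFuelA f n1 (PySem.Int.floordiv n2 10) * 10

def merge_numbers (n1 : Int) (n2 : Int) : Int :=
  mergeFuelA (n1.natAbs + n2.natAbs + 1) n1 n2

-- ===== PORT B =====
-- Fuel makes B's while-loop total in Lean; inside Pre_ it is never exhausted.
def mergeLoopB : Nat → Int → Int → Int → Int → Int
  | 0, n1, n2, result, place =>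
    result + (if n1 ≠ 0 then n1 else n2) * place
  | f + 1, n1, n2, result, place =>
    if n1 ≠ 0 ∧ n2 ≠ 0 then
      if PySem.Int.mod n1 10 < PySem.Int.mod n2 10 then
        mergeLoopB f (PySem.Int.floordiv n1 10) n2
          (result + PySem.Int.mod n1 10 * place) (place * 10)
      else
        mergeLoopB f n1 (PySem.Int.floordiv n2 10)
          (result + PySem.Int.mod n2 10 * place) (place * 10)
    else
      result + (if n1 ≠ 0 then n1 else n2) * place

def merge_numbers_alt (n1 : Int) (n2 : Int) : Int :=
  mergeLoopB (n1.natAbs + n2.natAbs + 1) n1 n2 0 1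

-- ===== PRECONDITION & SPEC =====
-- Pre_ excludes n2 < 0: there A's termination depends on the digit pattern (e.g. merge_numbers(9, -1)
-- raises RecursionError because the tie-break keeps dividing the stuck -1), so no closed-form Pre_ can
-- admit exactly the returning ones; B's loop behaves identically there (same value, or diverges with A).
-- A negative n1 is kept: with n2 >= 0 A always returns (n1 sinks to -1, whose floor digit 9 is never picked).
def Pre_merge_numbers (n1 : Int) (n2 : Int) : Prop := 0 ≤ n2
instance (n1 : Int) (n2 : Int) : Decidable (Pre_merge_numbers n1 n2) := by unfold Pre_merge_numbers; infer_instance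
def pvWitness_merge_numbers : Int × Int := (31, 42)

def Spec_merge_numbers (n1 : Int) (n2 : Int) (out : Int) : Prop := out = merge_numbers_alt n1 n2
instance (n1 : Int) (n2 : Int) (out : Int) : Decidable (Spec_merge_numbers n1 n2 out) := by unfold Spec_merge_numbers; infer_instance

-- ===== CLAIM (what is proved, stated in full; the proofs are below) =====
def Claim_equal_merge_numbers : Prop := ∀ (n1 : Int) (n2 : Int), Dom_merge_numbers n1 n2 → Pre_merge_numbers n1 n2 → Spec_merge_numbers n1 n2 (merge_numbers n1 n2)

-- ===== LEMMAS AND PROOFS =====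

-- The loop invariant: B's loop state (result, place) accumulates exactly A's value.
lemma loopB_eq_mergeA : ∀ (f : Nat) (n1 n2 result place : Int),
    0 ≤ n2 → n1.natAbs + n2.natAbs < f →
    mergeLoopB f n1 n2 result place = result + mergeFuelA f n1 n2 * place := by
  intro f
  induction f with
  | zero => intro n1 n2 result place _ h; omega
  | succ f ih =>
    intro n1 n2 result place hpre hf
    by_cases h1 : n1 = 0
    · subst h1
      simp [mergeLoopB, mergeFuelA]
    · by_cases h2 : n2 = 0
      · subst h2
        simp [mergeLoopB, mergeFuelA, h1]
      · rw [show mergeLoopB (f+1) n1 n2 result place =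
            (if PySem.Int.mod n1 10 < PySem.Int.mod n2 10 then
              mergeLoopB f (PySem.Int.floordiv n1 10) n2
                (result + PySem.Int.mod n1 10 * place) (place * 10)
            else
              mergeLoopB f n1 (PySem.Int.floordiv n2 10)
                (result + PySem.Int.mod n2 10 * place) (place * 10)) from by
              simp [mergeLoopB, h1, h2]]
        rw [show mergeFuelA (f+1) n1 n2 =
            (if PySem.Int.mod n1 10 < PySem.Int.mod n2 10 then
              PySem.Int.mod n1 10 + mergeFuelA f (PySem.Int.floordiv n1 10) n2 * 10
            else
              PySem.Int.mod n2 10 + mergeFuelA f n1 (PySem.Int.floordiv n2 10) * 10) from by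
              simp [mergeFuelA, h1, h2]]
        have hm1 : PySem.Int.mod n1 10 = n1 % 10 := PySem.Int.mod_eq_emod_of_pos (by omega)
        have hm2 : PySem.Int.mod n2 10 = n2 % 10 := PySem.Int.mod_eq_emod_of_pos (by omega)
        have hd1 : PySem.Int.floordiv n1 10 = n1 / 10 := PySem.Int.floordiv_eq_ediv_of_pos (by omega)
        have hd2 : PySem.Int.floordiv n2 10 = n2 / 10 := PySem.Int.floordiv_eq_ediv_of_pos (by omega)
        rw [hm1, hm2, hd1, hd2]
        split_ifs with hlt
        · -- take n1's trailing digit; hlt rules out n1 = -1 (its digit 9 is never < a digit of n2 ≥ 0)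
          have hne1 : n1 ≠ -1 := by omega
          rw [ih (n1 / 10) n2 (result + n1 % 10 * place) (place * 10) hpre (by omega)]
          ring
        · -- take n2's trailing digit; n2 ≥ 1 here, so n2 / 10 shrinks and stays nonnegative
          rw [ih n1 (n2 / 10) (result + n2 % 10 * place) (place * 10) (by omega) (by omega)]
          ring

theorem merge_numbers_spec : Claim_equal_merge_numbers := by
  intro n1 n2 _ hpre
  unfold Spec_merge_numbers merge_numbers merge_numbers_alt
  rw [loopB_eq_mergeA _ _ _ _ _ hpre (by omega)]
  ring
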